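-- pv_equiv track=rewrite | github.com/Arsen1302/Code-copy-detector | TestData/solutions/problem_722_5.py | solution_722_5
-- ===== SOURCE A (Python) =====
-- from typing import List
--
-- def solution_722_5(arr: List[int], k: int) -> int:
--     n = len(arr)
--     dp = [0 for i in range(n+1)]
--     for i in range(1, n + 1):
--         current_max = 0
--         for j in range(1, min(i, k) + 1):
--             current_max = max(current_max, arr[i - j])
--             dp[i] = max(dp[i], dp[i - j] + current_max * j)
--     return dp[n]
-- ===== SOURCE B (Python) =====
-- from typing import List
--
-- def solution_722_5(arr: List[int], k: int) -> int:
--     # Push-style DP over block starts with a rolling window of the next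
--     # min(k, n) open cells, instead of a full table with backward scans.
--     n = len(arr)
--     width = min(k, n)
--     if width < 0:
--         width = 0
--     w = [0] * (width + 1)          # w[d] = best-so-far for cut position i + d
--     for i in range(n):
--         base = w[0]
--         cur_max = 0
--         for length in range(1, min(k, n - i) + 1):
--             x = arr[i + length - 1]
--             if x > cur_max:
--                 cur_max = x
--             cand = base + cur_max * length
--             if cand > w[length]:
--                 w[length] = cand
--         w.pop(0)
--         w.append(0)
--     return w[0]
-- ===== Notes on version B (the rewrite author's own statement) =====
-- stated objective: faster
-- what changed: Pull-style prefix DP over a full (n+1)-cell table with backward scans is replaced by a push-style DP over block starts that scatters candidates forward into a rolling window of only min(n,k)+1 open cells, reading a single finalized base cell per start and updating the running block max with plain comparisons.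
import Mathlib
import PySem

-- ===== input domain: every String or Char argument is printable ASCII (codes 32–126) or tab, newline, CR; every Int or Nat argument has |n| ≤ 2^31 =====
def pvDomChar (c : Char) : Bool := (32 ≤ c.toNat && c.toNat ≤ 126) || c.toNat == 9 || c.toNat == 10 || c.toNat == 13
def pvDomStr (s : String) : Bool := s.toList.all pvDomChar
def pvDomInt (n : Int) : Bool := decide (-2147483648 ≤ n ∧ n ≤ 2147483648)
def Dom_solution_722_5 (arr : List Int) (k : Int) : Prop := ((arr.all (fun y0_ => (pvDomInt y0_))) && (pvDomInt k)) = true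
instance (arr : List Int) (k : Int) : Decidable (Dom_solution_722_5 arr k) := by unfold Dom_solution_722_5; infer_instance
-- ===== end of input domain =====

-- B replaces A's pull-style prefix DP over a full (n+1)-cell table (backward scans dp[i-j])
-- by a push-style DP over block starts that scatters candidates forward into a rolling
-- window of min(n,k)+1 open cells (same values; O(min(n,k)) space, fewer lookups).

-- ===== PORT A =====
-- indices i, i-j below are always in range, so pyGetD/pySetD (total forms) are exact here
def solution_722_5 (arr : List Int) (k : Int) : Int :=
  let n : Int := (arr.length : Int)
  let dp : List Int := (PySem.List.pyRange 0 (n + 1) 1).map (fun _ => 0)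
  let dp := (PySem.List.pyRange 1 (n + 1) 1).foldl (fun dp i =>
    ((PySem.List.pyRange 1 (min i k + 1) 1).foldl (fun (st : List Int × Int) j =>
      let cm := max st.2 (PySem.List.pyGetD arr (i - j) 0)
      (PySem.List.pySetD st.1 i
        (max (PySem.List.pyGetD st.1 i 0) (PySem.List.pyGetD st.1 (i - j) 0 + cm * j)), cm))
      (dp, 0)).1) dp
  PySem.List.pyGetD dp n 0

-- ===== PORT B =====
-- transliteration of Source B; w.pop(0) then w.append(0) is tail ++ [0] (w is never empty)
def solution_722_5_alt (arr : List Int) (k : Int) : Int :=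
  let n : Int := (arr.length : Int)
  let width : Int := min k n
  let width : Int := if width < 0 then 0 else width
  let w : List Int := List.replicate (width + 1).toNat 0
  let w := (PySem.List.pyRange 0 n 1).foldl (fun w i =>
    let base := PySem.List.pyGetD w 0 0
    let w2 := ((PySem.List.pyRange 1 (min k (n - i) + 1) 1).foldl
      (fun (st : List Int × Int) len =>
        let x := PySem.List.pyGetD arr (i + len - 1) 0
        let cm := if x > st.2 then x else st.2
        let cand := base + cm * len
        (if cand > PySem.List.pyGetD st.1 len 0 then PySem.List.pySetD st.1 len cand else st.1,
         cm))
      (w, 0)).1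
    w2.tail ++ [0]) w
  PySem.List.pyGetD w 0 0

-- ===== PRECONDITION & SPEC =====
def Spec_solution_722_5 (arr : List Int) (k : Int) (out : Int) : Prop := out = solution_722_5_alt arr k
instance (arr : List Int) (k : Int) (out : Int) : Decidable (Spec_solution_722_5 arr k out) := by unfold Spec_solution_722_5; infer_instance

-- ===== CLAIM (what is proved, stated in full; the proofs are below) =====
def Claim_equal_solution_722_5 : Prop := ∀ (arr : List Int) (k : Int), Dom_solution_722_5 arr k → Spec_solution_722_5 arr k (solution_722_5 arr k)

-- ===== LEMMAS AND PROOFS =====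

-- named copies of the two ports' loop bodies (definitionally equal to the lambdas above)
def innerA (arr : List Int) (_k : Int) (i : Int) (st : List Int × Int) (j : Int) : List Int × Int :=
  let cm := max st.2 (PySem.List.pyGetD arr (i - j) 0)
  (PySem.List.pySetD st.1 i
    (max (PySem.List.pyGetD st.1 i 0) (PySem.List.pyGetD st.1 (i - j) 0 + cm * j)), cm)

def stepA (arr : List Int) (k : Int) (dp : List Int) (i : Int) : List Int :=
  ((PySem.List.pyRange 1 (min i k + 1) 1).foldl (innerA arr k i) (dp, 0)).1

def innerB (arr : List Int) (base : Int) (i : Int) (st : List Int × Int) (len : Int) : List Int × Int :=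
  let x := PySem.List.pyGetD arr (i + len - 1) 0
  let cm := if x > st.2 then x else st.2
  let cand := base + cm * len
  (if cand > PySem.List.pyGetD st.1 len 0 then PySem.List.pySetD st.1 len cand else st.1, cm)

def stepB (arr : List Int) (k : Int) (n : Int) (w : List Int) (i : Int) : List Int :=
  (((PySem.List.pyRange 1 (min k (n - i) + 1) 1).foldl
      (innerB arr (PySem.List.pyGetD w 0 0) i) (w, 0)).1).tail ++ [0]

-- the clamped running maxima: cmA scans backwards arr[i], arr[i-1], …; cmB forwards arr[s], arr[s+1], …
def cmA (arr : List Int) (i : Nat) : Nat → Int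
  | 0 => 0
  | j+1 => max (cmA arr i j) (arr.getD (i - j) 0)

def cmB (arr : List Int) (s : Nat) : Nat → Int
  | 0 => 0
  | j+1 => max (cmB arr s j) (arr.getD (s + j) 0)

-- the common value recurrence (A's dp[i] = fv i)
def fv (arr : List Int) (K : Nat) : Nat → Int
  | 0 => 0
  | i+1 => (List.range (min (i+1) K)).foldl
      (fun acc t => max acc (fv arr K (i - t) + cmA arr i (t+1) * ((t : Int)+1))) 0
termination_by i => i
decreasing_by omega

-- partial inner maximum on the A side (first j candidates at outer index m+1)
def pfA (arr : List Int) (K m j : Nat) : Int :=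
  (List.range j).foldl (fun acc t => max acc (fv arr K (m - t) + cmA arr m (t+1) * ((t : Int)+1))) 0

-- A's table after m outer iterations
def Dtab (arr : List Int) (K m : Nat) : List Int :=
  (List.range (arr.length+1)).map (fun p => if p ≤ m then fv arr K p else 0)

-- B's partial cell value: max over candidates j with 1 ≤ j ≤ min p K, p - j < s, for position p ≤ n
def Pw (arr : List Int) (K s p : Nat) : Int :=
  if p ≤ arr.length then
    (List.range' (max 1 (p+1-s)) (min p K + 1 - max 1 (p+1-s))).foldl
      (fun acc j => max acc (fv arr K (p-j) + cmB arr (p-j) j * (j : Int))) 0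
  else 0

-- B's window after s outer iterations
def Wtab (arr : List Int) (K s : Nat) : List Int :=
  (List.range (min K arr.length + 1)).map (fun d => Pw arr K s (s+d))

-- B's window in the middle of outer iteration s, with inner lengths 1..t already processed
def Wpart (arr : List Int) (K s t : Nat) : List Int :=
  (List.range (min K arr.length + 1)).map
    (fun d => if 1 ≤ d ∧ d ≤ t then Pw arr K (s+1) (s+d) else Pw arr K s (s+d))

lemma max_shift (c : Nat → Int) (l : List Nat) : ∀ a b : Int,
    l.foldl (fun acc j => max acc (c j)) (max a b) = max a (l.foldl (fun acc j => max acc (c j)) b) := by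
  induction l with
  | nil => intro a b; simp
  | cons x l ih =>
    intro a b
    simp only [List.foldl_cons]
    rw [max_assoc]
    exact ih a (max b (c x))

lemma cmB_cons (arr : List Int) (s L : Nat) :
    cmB arr s (L+1) = max (arr.getD s 0) (cmB arr (s+1) L) := by
  induction L generalizing s with
  | zero => simp [cmB, max_comm]
  | succ L ih =>
    have e1 : cmB arr s (L+1+1) = max (cmB arr s (L+1)) (arr.getD (s + (L+1)) 0) := rfl
    have e2 : cmB arr (s+1) (L+1) = max (cmB arr (s+1) L) (arr.getD (s+1+L) 0) := rfl
    have hidx : s + (L+1) = s+1+L := by omega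
    rw [e1, e2, ih s, hidx, max_assoc]

lemma cmB_eq_cmA (arr : List Int) (i L : Nat) (h : L ≤ i+1) :
    cmB arr (i+1-L) L = cmA arr i L := by
  induction L with
  | zero => rfl
  | succ L ih =>
    have h1 : i+1-(L+1) = i - L := by omega
    have h2 : i - L + 1 = i + 1 - L := by omega
    rw [h1, cmB_cons, h2, ih (by omega), max_comm]
    rfl

lemma set_map_range {α : Type} (g : Nat → α) (L p : Nat) (v : α) (_h : p < L) :
    ((List.range L).map g).set p v = (List.range L).map (fun q => if q = p then v else g q) := by
  apply List.ext_getElem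
  · simp
  · intro i h1 h2
    simp only [List.getElem_set, List.getElem_map, List.getElem_range]
    by_cases hip : p = i
    · subst hip; simp
    · rw [if_neg hip, if_neg (fun hh => hip hh.symm)]

lemma fv_succ (arr : List Int) (K m : Nat) : fv arr K (m+1) = pfA arr K m (min (m+1) K) := by
  rw [fv, pfA]

lemma pfA_succ (arr : List Int) (K m j : Nat) :
    pfA arr K m (j+1) = max (pfA arr K m j) (fv arr K (m - j) + cmA arr m (j+1) * ((j : Int)+1)) := by
  simp [pfA, List.range_succ]

lemma Pw_self (arr : List Int) (K s : Nat) (h : s ≤ arr.length) : Pw arr K s s = fv arr K s := by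
  have hm : max 1 (s+1-s) = 1 := by omega
  cases s with
  | zero => simp [Pw, fv]
  | succ i =>
    rw [Pw, if_pos h, hm, fv]
    have hc : min (i+1) K + 1 - 1 = min (i+1) K := by omega
    rw [hc, List.range'_eq_map_range, List.foldl_map]
    apply PySem.List.foldl_congr_mem
    intro acc t ht
    have ht' : t < i + 1 := by
      have := List.mem_range.mp ht; omega
    have hj : 1 + t = t + 1 := Nat.add_comm 1 t
    have h2 : i + 1 - (t+1) = i - t := by omega
    have h3 : cmB arr (i - t) (t+1) = cmA arr i (t+1) := by
      have := cmB_eq_cmA arr i (t+1) (by omega)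
      rwa [h2] at this
    rw [hj, h2, h3]
    push_cast
    ring_nf

lemma Pw_start (arr : List Int) (K p : Nat) : Pw arr K 0 p = 0 := by
  have h : min p K + 1 - max 1 (p+1-0) = 0 := by omega
  rw [Pw, h]
  simp

lemma Pw_step (arr : List Int) (K s len : Nat) (h1 : 1 ≤ len) (h2 : len ≤ K) (h3 : s + len ≤ arr.length) :
    Pw arr K (s+1) (s+len) = max (Pw arr K s (s+len)) (fv arr K s + cmB arr s len * (len : Int)) := by
  have hlo1 : max 1 (s+len+1-(s+1)) = len := by omega
  have hlo2 : max 1 (s+len+1-s) = len + 1 := by omega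
  have hhi : len ≤ min (s+len) K := by omega
  have hc : min (s+len) K + 1 - len = (min (s+len) K + 1 - (len+1)) + 1 := by omega
  rw [Pw, Pw, if_pos h3, if_pos h3, hlo1, hlo2, hc, List.range'_succ]
  simp only [List.foldl_cons]
  have hp : s + len - len = s := by omega
  rw [show (max (0:Int) (fv arr K (s+len-len) + cmB arr (s+len-len) len * (len:Int)))
      = max (fv arr K (s+len-len) + cmB arr (s+len-len) len * (len:Int)) 0 from max_comm _ _]
  rw [max_shift]
  rw [hp, max_comm]

lemma Pw_untouched (arr : List Int) (K s d : Nat) (hd : 1 ≤ d) (h : min K (arr.length - s) < d) :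
    Pw arr K (s+1) (s+d) = Pw arr K s (s+d) := by
  by_cases hp : s + d ≤ arr.length
  · rw [Pw, Pw, if_pos hp, if_pos hp,
        show min (s+d) K + 1 - max 1 (s+d+1-(s+1)) = 0 from by omega,
        show min (s+d) K + 1 - max 1 (s+d+1-s) = 0 from by omega]
    simp
  · simp [Pw, hp]

lemma Pw_new (arr : List Int) (K s : Nat) : Pw arr K (s+1) (s+1+min K arr.length) = 0 := by
  by_cases hp : s+1+min K arr.length ≤ arr.length
  · rw [Pw, if_pos hp,
        show min (s+1+min K arr.length) K + 1 - max 1 (s+1+min K arr.length+1-(s+1)) = 0 from by omega]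
    simp
  · simp [Pw, hp]

lemma innerA_run (arr : List Int) (k : Int) (m : Nat) (hm : m < arr.length) :
    ∀ j, j ≤ min (m+1) k.toNat →
    ((List.range j).map (fun t : Nat => (1 : Int) + (t : Int))).foldl (innerA arr k ((m : Int)+1)) (Dtab arr k.toNat m, 0)
      = ((Dtab arr k.toNat m).set (m+1) (pfA arr k.toNat m j), cmA arr m j) := by
  intro j
  induction j with
  | zero =>
    intro _
    simp only [List.range_zero, List.map_nil, List.foldl_nil]
    have hset : (Dtab arr k.toNat m).set (m+1) (pfA arr k.toNat m 0) = Dtab arr k.toNat m := by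
      rw [Dtab, set_map_range _ _ _ _ (by omega)]
      apply List.map_congr_left
      intro q hq
      by_cases hq1 : q = m+1
      · subst hq1
        rw [if_pos rfl, if_neg (by omega)]
        simp [pfA]
      · rw [if_neg hq1]
    rw [hset]
    rfl
  | succ j ih =>
    intro hj
    rw [List.range_succ, List.map_append, List.foldl_append, ih (by omega)]
    simp only [List.map_cons, List.map_nil, List.foldl_cons, List.foldl_nil]
    have hjm : j ≤ m := by omega
    have hidx : ((m : Int)+1) - (1+(j : Int)) = ((m - j : Nat) : Int) := by omega
    have hcast : ((m : Int)+1) = ((m+1 : Nat) : Int) := by push_cast; ring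
    have hsetmap := set_map_range (fun p => if p ≤ m then fv arr k.toNat p else 0)
        (arr.length+1) (m+1) (pfA arr k.toNat m j) (by omega)
    have harr : PySem.List.pyGetD arr (((m : Int)+1) - (1+(j : Int))) 0 = arr.getD (m - j) 0 := by
      rw [hidx, PySem.List.pyGetD_natCast]
    have hread1 : PySem.List.pyGetD ((Dtab arr k.toNat m).set (m+1) (pfA arr k.toNat m j)) ((m : Int)+1) 0
        = pfA arr k.toNat m j := by
      rw [hcast, PySem.List.pyGetD_natCast, Dtab, hsetmap,
          PySem.List.getD_map_range _ _ _ _ (by omega), if_pos rfl]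
    have hread2 : PySem.List.pyGetD ((Dtab arr k.toNat m).set (m+1) (pfA arr k.toNat m j)) (((m - j : Nat)) : Int) 0
        = fv arr k.toNat (m - j) := by
      rw [PySem.List.pyGetD_natCast, Dtab, hsetmap,
          PySem.List.getD_map_range _ _ _ _ (by omega),
          if_neg (by omega : ¬ (m - j = m+1))]
      beta_reduce
      rw [if_pos (by omega : m - j ≤ m)]
    simp only [innerA]
    rw [harr, hread1, hidx, hread2, hcast, PySem.List.pySetD_natCast, List.set_set]
    have hcm : max (cmA arr m j) (arr.getD (m - j) 0) = cmA arr m (j+1) := rfl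
    rw [hcm, pfA_succ, show ((1:Int)+(j:Int)) = ((j:Int)+1) from by ring]

lemma stepA_run (arr : List Int) (k : Int) (m : Nat) (hm : m < arr.length) :
    stepA arr k (Dtab arr k.toNat m) ((m : Int)+1) = Dtab arr k.toNat (m+1) := by
  have hJ : ((min ((m : Int)+1) k + 1 - 1)).toNat = min (m+1) k.toNat := by omega
  rw [stepA, PySem.List.pyRange_one, hJ,
      innerA_run arr k m hm (min (m+1) k.toNat) le_rfl]
  have hfull : pfA arr k.toNat m (min (m+1) k.toNat) = fv arr k.toNat (m+1) := (fv_succ arr k.toNat m).symm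
  rw [hfull, Dtab, set_map_range _ _ _ _ (by omega), Dtab]
  apply List.map_congr_left
  intro q hq
  by_cases h1 : q = m+1
  · subst h1; rw [if_pos rfl, if_pos (by omega)]
  · rw [if_neg h1]
    by_cases h2 : q ≤ m
    · rw [if_pos h2, if_pos (by omega)]
    · rw [if_neg h2, if_neg (by omega)]

lemma outerA_run (arr : List Int) (k : Int) :
    ∀ m, m ≤ arr.length →
    ((List.range m).map (fun t : Nat => (1 : Int) + (t : Int))).foldl (stepA arr k) (Dtab arr k.toNat 0)
      = Dtab arr k.toNat m := by
  intro m
  induction m with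
  | zero => intro _; rfl
  | succ m ih =>
    intro hm
    rw [List.range_succ, List.map_append, List.foldl_append, ih (by omega)]
    simp only [List.map_cons, List.map_nil, List.foldl_cons, List.foldl_nil]
    rw [show ((1 : Int) + (m : Int)) = ((m : Int) + 1) from by ring]
    exact stepA_run arr k m (by omega)

lemma portA_fv (arr : List Int) (k : Int) : solution_722_5 arr k = fv arr k.toNat arr.length := by
  have e : solution_722_5 arr k
      = PySem.List.pyGetD ((PySem.List.pyRange 1 ((arr.length : Int)+1) 1).foldl (stepA arr k)
          ((PySem.List.pyRange 0 ((arr.length : Int)+1) 1).map (fun _ => 0)))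
          (arr.length : Int) 0 := rfl
  have hinit : (PySem.List.pyRange 0 ((arr.length : Int)+1) 1).map (fun _ => (0 : Int))
      = Dtab arr k.toNat 0 := by
    rw [PySem.List.pyRange_one, List.map_map, Dtab,
        show (((arr.length : Int)+1) - 0).toNat = arr.length + 1 from by omega]
    apply List.map_congr_left
    intro q hq
    cases q with
    | zero => simp [fv]
    | succ q => simp
  have houter : PySem.List.pyRange 1 ((arr.length : Int)+1) 1
      = (List.range arr.length).map (fun t : Nat => (1 : Int) + (t : Int)) := by
    rw [PySem.List.pyRange_one,
        show (((arr.length : Int)+1) - 1).toNat = arr.length from by omega]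
  rw [e, hinit, houter, outerA_run arr k arr.length le_rfl,
      PySem.List.pyGetD_natCast, Dtab,
      PySem.List.getD_map_range _ _ _ _ (by omega), if_pos le_rfl]

lemma innerB_run (arr : List Int) (k : Int) (s : Nat) (hs : s < arr.length) :
    ∀ t, t ≤ min k.toNat (arr.length - s) →
    ((List.range t).map (fun u : Nat => (1 : Int) + (u : Int))).foldl
        (innerB arr (fv arr k.toNat s) (s : Int)) (Wtab arr k.toNat s, 0)
      = (Wpart arr k.toNat s t, cmB arr s t) := by
  intro t
  induction t with
  | zero =>
    intro _
    simp only [List.range_zero, List.map_nil, List.foldl_nil]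
    rw [show Wpart arr k.toNat s 0 = Wtab arr k.toNat s from by
      rw [Wpart, Wtab]
      apply List.map_congr_left
      intro d _
      rw [if_neg (by omega)]]
    rfl
  | succ t ih =>
    intro ht
    rw [List.range_succ, List.map_append, List.foldl_append, ih (by omega)]
    simp only [List.map_cons, List.map_nil, List.foldl_cons, List.foldl_nil]
    simp only [innerB]
    have hidx : (s : Int) + (1 + (t : Int)) - 1 = ((s + t : Nat) : Int) := by omega
    rw [hidx, PySem.List.pyGetD_natCast]
    have hcm : (if arr.getD (s+t) 0 > cmB arr s t then arr.getD (s+t) 0 else cmB arr s t)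
        = cmB arr s (t+1) := by
      by_cases hlt : cmB arr s t < arr.getD (s+t) 0
      · rw [if_pos hlt]; exact (max_eq_right hlt.le).symm
      · rw [if_neg hlt]; exact (max_eq_left (le_of_not_gt hlt)).symm
    rw [hcm]
    have hc1 : (1 : Int) + (t : Int) = ((t+1 : Nat) : Int) := by omega
    rw [hc1, PySem.List.pyGetD_natCast]
    have hW : t + 1 < min k.toNat arr.length + 1 := by omega
    have hold : (Wpart arr k.toNat s t).getD (t+1) 0 = Pw arr k.toNat s (s+(t+1)) := by
      rw [Wpart, PySem.List.getD_map_range _ _ _ _ hW]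
      rw [if_neg (by omega)]
    rw [hold]
    have hcand : Pw arr k.toNat (s+1) (s+(t+1))
        = max (Pw arr k.toNat s (s+(t+1))) (fv arr k.toNat s + cmB arr s (t+1) * ((t+1 : Nat) : Int)) :=
      Pw_step arr k.toNat s (t+1) (by omega) (by omega) (by omega)
    have hset : (Wpart arr k.toNat s t).set (t+1)
        (max (Pw arr k.toNat s (s+(t+1))) (fv arr k.toNat s + cmB arr s (t+1) * ((t+1 : Nat) : Int)))
        = Wpart arr k.toNat s (t+1) := by
      rw [Wpart, set_map_range _ _ _ _ hW, Wpart]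
      apply List.map_congr_left
      intro d _
      by_cases hdt : d = t+1
      · subst hdt
        rw [if_pos rfl, if_pos (by omega)]
        rw [← hcand]
      · rw [if_neg hdt]
        by_cases h1d : 1 ≤ d ∧ d ≤ t
        · rw [if_pos h1d, if_pos (by omega)]
        · rw [if_neg h1d, if_neg (by omega)]
    simp only [Prod.mk.injEq]
    refine ⟨?_, trivial⟩
    by_cases hlt : Pw arr k.toNat s (s+(t+1))
        < fv arr k.toNat s + cmB arr s (t+1) * ((t+1 : Nat) : Int)
    · rw [if_pos hlt, PySem.List.pySetD_natCast, ← hset, max_eq_right hlt.le]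
    · rw [if_neg hlt, ← hset, max_eq_left (le_of_not_gt hlt)]
      have hval : (Wpart arr k.toNat s t)[t+1]'(by simp [Wpart]; omega) = Pw arr k.toNat s (s+(t+1)) := by
        simp only [Wpart, List.getElem_map, List.getElem_range]
        rw [if_neg (by omega)]
      rw [← hval]
      exact (List.set_getElem_self _).symm

lemma stepB_run (arr : List Int) (k : Int) (s : Nat) (hs : s < arr.length) :
    stepB arr k (arr.length : Int) (Wtab arr k.toNat s) (s : Int) = Wtab arr k.toNat (s+1) := by
  have hbase : PySem.List.pyGetD (Wtab arr k.toNat s) 0 0 = fv arr k.toNat s := by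
    rw [PySem.List.pyGetD_zero, Wtab, PySem.List.getD_map_range _ _ _ _ (by omega)]
    rw [Nat.add_zero]
    exact Pw_self arr k.toNat s (by omega)
  have hT : (min k ((arr.length : Int) - (s : Int)) + 1 - 1).toNat = min k.toNat (arr.length - s) := by
    omega
  rw [stepB, hbase, PySem.List.pyRange_one, hT,
      innerB_run arr k s hs (min k.toNat (arr.length - s)) le_rfl]
  rw [Wpart, List.range_succ_eq_map, List.map_cons, List.tail_cons, List.map_map,
      Wtab, List.range_succ, List.map_append, List.map_cons, List.map_nil]
  congr 1
  · apply List.map_congr_left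
    intro d hd
    simp only [Function.comp_apply]
    by_cases hdT : d + 1 ≤ min k.toNat (arr.length - s)
    · rw [if_pos (by omega), show s + (Nat.succ d) = s+1+d from by omega]
    · rw [if_neg (by omega)]
      have := Pw_untouched arr k.toNat s (d+1) (by omega) (by omega)
      rw [show s + (Nat.succ d) = s + (d+1) from by omega, ← this,
          show s + (d+1) = s+1+d from by omega]
  · exact (congrArg (fun z => [z]) (Pw_new arr k.toNat s)).symm

lemma outerB_run (arr : List Int) (k : Int) :
    ∀ m, m ≤ arr.length →
    ((List.range m).map (fun t : Nat => (t : Int))).foldl (stepB arr k (arr.length : Int)) (Wtab arr k.toNat 0)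
      = Wtab arr k.toNat m := by
  intro m
  induction m with
  | zero => intro _; rfl
  | succ m ih =>
    intro hm
    rw [List.range_succ, List.map_append, List.foldl_append, ih (by omega)]
    simp only [List.map_cons, List.map_nil, List.foldl_cons, List.foldl_nil]
    exact stepB_run arr k m (by omega)

lemma portB_fv (arr : List Int) (k : Int) : solution_722_5_alt arr k = fv arr k.toNat arr.length := by
  have e : solution_722_5_alt arr k
      = PySem.List.pyGetD ((PySem.List.pyRange 0 (arr.length : Int) 1).foldl
          (stepB arr k (arr.length : Int))
          (List.replicate ((if min k ((arr.length : Int)) < 0 then 0 else min k ((arr.length : Int))) + 1).toNat 0))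
          0 0 := rfl
  have hwidth : ((if min k ((arr.length : Int)) < 0 then 0 else min k ((arr.length : Int))) + 1).toNat
      = min k.toNat arr.length + 1 := by
    by_cases hk : min k ((arr.length : Int)) < 0
    · rw [if_pos hk]; omega
    · rw [if_neg hk]; omega
  have hinit : List.replicate (min k.toNat arr.length + 1) (0 : Int) = Wtab arr k.toNat 0 := by
    apply List.ext_getElem
    · simp [Wtab]
    · intro i h1 h2
      simp [Wtab, Pw_start]
  have houter : PySem.List.pyRange 0 ((arr.length : Int)) 1
      = (List.range arr.length).map (fun t : Nat => (t : Int)) := by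
    rw [PySem.List.pyRange_one, show (((arr.length : Int)) - 0).toNat = arr.length from by omega]
    apply List.map_congr_left
    intro t _
    exact zero_add _
  rw [e, hwidth, hinit, houter, outerB_run arr k arr.length le_rfl,
      PySem.List.pyGetD_zero, Wtab, PySem.List.getD_map_range _ _ _ _ (by omega)]
  rw [Nat.add_zero]
  exact Pw_self arr k.toNat arr.length le_rfl

-- ===== VERDICT (by name: the statement is the Claim_ definition above) =====
theorem solution_722_5_spec : Claim_equal_solution_722_5 := by
  intro arr k _
  unfold Spec_solution_722_5
  rw [portA_fv, portB_fv]
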